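-- pv_equiv track=rewrite | github.com/ariuk44/retake_exam_prep | day_10.py | isTrivalent
-- ===== SOURCE A (Python) =====
-- def isTrivalent(arr):
--     if len(arr) < 3:
--         return 0
--     v1 = arr[0]
--     v2 = None
--     v3 = None
--     for i in arr:
--         if i == v1 or i == v2 or i == v3:
--             continue
--         elif v2 is None:
--             v2 = i
--         elif v3 is None:
--             v3 = i
--         else:
--             return 0
--     if v2 is not None and v3 is not None:
--         return 1
--     return 0
-- ===== SOURCE B (Python) =====
-- def isTrivalent(arr):
--     return 1 if len(set(arr)) == 3 else 0
-- ===== Notes on version B (the rewrite author's own statement) =====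
-- stated objective: simpler
-- what changed: Replaced the manual v1/v2/v3 slot tracking, the early-exit loop and the length guard by a single expression on the set of distinct values (len(set(arr)) == 3), which is equivalent since exactly three distinct values already forces len(arr) >= 3.
import Mathlib
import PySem

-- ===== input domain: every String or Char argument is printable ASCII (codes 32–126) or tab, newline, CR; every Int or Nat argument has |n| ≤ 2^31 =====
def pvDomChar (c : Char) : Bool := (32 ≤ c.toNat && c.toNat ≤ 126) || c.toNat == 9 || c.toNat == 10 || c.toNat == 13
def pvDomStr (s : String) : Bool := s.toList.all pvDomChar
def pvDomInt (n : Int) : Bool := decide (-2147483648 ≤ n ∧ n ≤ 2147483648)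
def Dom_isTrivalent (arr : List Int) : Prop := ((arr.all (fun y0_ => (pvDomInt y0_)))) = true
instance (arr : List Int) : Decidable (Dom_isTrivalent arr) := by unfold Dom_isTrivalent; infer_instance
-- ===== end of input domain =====

-- B replaces A's manual v1/v2/v3 slot tracking and early-exit loop by len(set(arr)) == 3 (simpler).

-- ===== PORT A =====
-- the for-loop over arr with the mutable v2/v3 slots and the early `return 0`
def isTrivalentLoop (v1 : Int) (v2 v3 : Option Int) : List Int → Int
  | [] => if v2.isSome && v3.isSome then 1 else 0
  | i :: rest =>
    if i = v1 ∨ v2 = some i ∨ v3 = some i then isTrivalentLoop v1 v2 v3 rest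
    else if v2 = none then isTrivalentLoop v1 (some i) v3 rest
    else if v3 = none then isTrivalentLoop v1 v2 (some i) rest
    else 0

def isTrivalent (arr : List Int) : Int :=
  if arr.length < 3 then 0
  else
    match arr with
    | [] => 0                       -- unreachable: length ≥ 3
    | v1 :: _ => isTrivalentLoop v1 none none arr

-- ===== PORT B =====
def isTrivalent_alt (arr : List Int) : Int :=
  if (PySem.Set.ofList arr).length = 3 then 1 else 0

-- ===== PRECONDITION & SPEC =====
def Spec_isTrivalent (arr : List Int) (out : Int) : Prop := out = isTrivalent_alt arr
instance (arr : List Int) (out : Int) : Decidable (Spec_isTrivalent arr out) := by unfold Spec_isTrivalent; infer_instance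

-- ===== CLAIM (what is proved, stated in full; the proofs are below) =====
def Claim_equal_isTrivalent : Prop := ∀ (arr : List Int), Dom_isTrivalent arr → Spec_isTrivalent arr (isTrivalent arr)

-- ===== LEMMAS AND PROOFS =====

theorem ofList_length_eq_card (xs : List Int) :
    (PySem.Set.ofList xs).length = xs.toFinset.card := by
  have h1 : PySem.Set.ofList xs = PySem.List.dedup xs := by
    simp
  have h2 : (PySem.List.dedup xs).toFinset = xs.toFinset := by
    ext a; simp [List.mem_toFinset, PySem.List.mem_dedup]
  rw [h1, ← h2, List.toFinset_card_of_nodup (PySem.List.nodup_dedup xs)]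

theorem loop_spec : ∀ (rest : List Int) (v1 : Int) (v2 v3 : Option Int),
    (v2 = none → v3 = none) →
    (∀ a, v2 = some a → a ≠ v1) →
    (∀ b, v3 = some b → b ≠ v1 ∧ v2 ≠ some b) →
    isTrivalentLoop v1 v2 v3 rest =
      if (insert v1 ((v2.toList ++ v3.toList ++ rest).toFinset) : Finset Int).card = 3
      then 1 else 0 := by
  intro rest
  induction rest with
  | nil =>
    intro v1 v2 v3 h23 h2 h3
    cases v2 with
    | none =>
      have := h23 rfl; subst this
      simp [isTrivalentLoop]
    | some a =>
      cases v3 with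
      | none =>
        have ha := h2 a rfl
        simp [isTrivalentLoop]
        rw [Finset.card_insert_of_notMem (by simp [Ne.symm ha])]
        simp
      | some b =>
        have ha := h2 a rfl
        have hb := h3 b rfl
        have hba : b ≠ a := fun h => hb.2 (by rw [h])
        simp [isTrivalentLoop]
        rw [Finset.card_insert_of_notMem
              (by simp; exact ⟨fun h => ha h.symm, fun h => hb.1 h.symm⟩),
            Finset.card_insert_of_notMem (by simp; exact fun h => hba h.symm)]
        simp
  | cons i rest ih =>
    intro v1 v2 v3 h23 h2 h3
    by_cases hc : i = v1 ∨ v2 = some i ∨ v3 = some i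
    · rw [isTrivalentLoop, if_pos hc, ih v1 v2 v3 h23 h2 h3]
      have hset : (insert v1 ((v2.toList ++ v3.toList ++ rest).toFinset) : Finset Int)
          = insert v1 ((v2.toList ++ v3.toList ++ (i :: rest)).toFinset) := by
        ext a
        rcases hc with h | h | h
        · subst h; simp
        · subst h; simp
        · subst h; simp
      rw [hset]
    · push_neg at hc
      obtain ⟨hv1, hv2, hv3⟩ := hc
      cases v2 with
      | none =>
        have := h23 rfl; subst this
        rw [isTrivalentLoop, if_neg (by simp [hv1]), if_pos rfl]
        rw [ih v1 (some i) none (by simp) (by rintro a ⟨rfl⟩; exact hv1) (by simp)]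
        have hset : (insert v1 (((some i).toList ++ (none : Option Int).toList ++ rest).toFinset) : Finset Int)
            = insert v1 (((none : Option Int).toList ++ (none : Option Int).toList ++ (i :: rest)).toFinset) := by
          ext a; simp
        rw [hset]
      | some x =>
        cases v3 with
        | none =>
          rw [isTrivalentLoop, if_neg (by simp [hv1, hv2]), if_neg (by simp), if_pos rfl]
          rw [ih v1 (some x) (some i) (by simp) h2
              (by rintro b ⟨rfl⟩; exact ⟨hv1, hv2⟩)]
          have hset : (insert v1 (((some x).toList ++ (some i).toList ++ rest).toFinset) : Finset Int)
              = insert v1 (((some x).toList ++ (none : Option Int).toList ++ (i :: rest)).toFinset) := by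
            ext a; simp
          rw [hset]
        | some y =>
          rw [isTrivalentLoop, if_neg (by simp [hv1, hv2, hv3]), if_neg (by simp), if_neg (by simp)]
          have hx := h2 x rfl
          have hy := h3 y rfl
          have hyx : y ≠ x := fun h => hy.2 (by rw [h])
          have hix : i ≠ x := fun h => hv2 (by rw [h])
          have hiy : i ≠ y := fun h => hv3 (by rw [h])
          have hsub : ({v1, x, y, i} : Finset Int) ⊆
              insert v1 (((some x).toList ++ (some y).toList ++ (i :: rest)).toFinset) := by
            intro a ha; simp at ha ⊢; tauto
          have hcard : ({v1, x, y, i} : Finset Int).card = 4 := by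
            rw [Finset.card_insert_of_notMem
                  (by simp; exact ⟨fun h => hx h.symm, fun h => hy.1 h.symm, fun h => hv1 h.symm⟩),
                Finset.card_insert_of_notMem
                  (by simp; exact ⟨fun h => hyx h.symm, fun h => hix h.symm⟩),
                Finset.card_insert_of_notMem (by simp; exact fun h => hiy h.symm)]
            simp
          have h4 : 4 ≤ (insert v1 (((some x).toList ++ (some y).toList ++ (i :: rest)).toFinset) : Finset Int).card := by
            rw [← hcard]; exact Finset.card_le_card hsub
          rw [if_neg (by omega)]

theorem card_le_length (xs : List Int) : xs.toFinset.card ≤ xs.length :=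
  xs.toFinset_card_le

-- ===== VERDICT (by name: the statement is the Claim_ definition above) =====
theorem isTrivalent_spec : Claim_equal_isTrivalent := by
  intro arr _
  unfold Spec_isTrivalent isTrivalent isTrivalent_alt
  rw [ofList_length_eq_card]
  by_cases hlen : arr.length < 3
  · rw [if_pos hlen]
    have := card_le_length arr
    rw [if_neg (by omega)]
  · rw [if_neg hlen]
    match arr, hlen with
    | v1 :: rest, _ =>
      show isTrivalentLoop v1 none none (v1 :: rest) = _
      have hfirst : isTrivalentLoop v1 none none (v1 :: rest)
          = isTrivalentLoop v1 none none rest := by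
        rw [isTrivalentLoop, if_pos (Or.inl rfl)]
      rw [hfirst, loop_spec rest v1 none none (by simp) (by simp) (by simp)]
      simp [List.toFinset_cons]
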